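-- pv_equiv track=rewrite | github.com/DavidAkaFunky/ProgFundamentals2019 | ProjetoFP.py | eh_conj_posicoes
-- ===== SOURCE A (Python) =====
-- def eh_posicao (unidade):
--     valor_logico4 = True
--     if len(unidade) != 2:
--         valor_logico4 = False
--     else:
--         for el in unidade:
--             if not isinstance(el,int) or el < 0:
--                 valor_logico4 = False
--     return valor_logico4
--
-- def eh_conj_posicoes (conjunto):
--     valor_logico5 = True
--     for el in range(len(conjunto)):
--         if not eh_posicao(conjunto[el]):
--             valor_logico5 = False
--         else:
--             for el in range(len(conjunto)-1):
--                 if conjunto[el] == conjunto[el+1]: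
--                     valor_logico5 = False
--     return valor_logico5
-- ===== SOURCE B (Python) =====
-- def _eh_pos(u):
--     return len(u) == 2 and all(isinstance(x, int) and x >= 0 for x in u)
--
-- def eh_conj_posicoes(conjunto):
--     # single linear pass: validate each element and compare it to its predecessor
--     if not conjunto:
--         return True
--     if not _eh_pos(conjunto[0]):
--         return False
--     for prev, cur in zip(conjunto, conjunto[1:]):
--         if not _eh_pos(cur) or prev == cur:
--             return False
--     return True
-- ===== Notes on version B (the rewrite author's own statement) =====
-- stated objective: simpler
-- what changed: Replaced A's nested index loops (which rescan all adjacent pairs for every valid element) with a single linear pass that validates each element and compares it to its predecessor, with early return.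
import Mathlib
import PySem

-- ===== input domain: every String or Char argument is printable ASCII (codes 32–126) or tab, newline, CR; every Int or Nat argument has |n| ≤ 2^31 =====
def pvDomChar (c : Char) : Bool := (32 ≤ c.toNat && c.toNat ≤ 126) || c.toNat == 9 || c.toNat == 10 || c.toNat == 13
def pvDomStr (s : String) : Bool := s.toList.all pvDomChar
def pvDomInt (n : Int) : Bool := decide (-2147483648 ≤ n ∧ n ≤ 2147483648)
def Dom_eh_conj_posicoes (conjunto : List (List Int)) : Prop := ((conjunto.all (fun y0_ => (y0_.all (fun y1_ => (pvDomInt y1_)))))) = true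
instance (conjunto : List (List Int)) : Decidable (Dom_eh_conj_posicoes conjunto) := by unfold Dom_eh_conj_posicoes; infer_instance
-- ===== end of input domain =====

-- B replaces A's nested index loops by one linear pass comparing each element to its predecessor, with early return.

-- ===== PORT A =====
-- helper eh_posicao: length check, then a loop setting the flag to False on a negative element
def eh_posicao (unidade : List Int) : Bool :=
  if unidade.length ≠ 2 then false
  else unidade.foldl (fun v4 el => if el < 0 then false else v4) true

def eh_conj_posicoes (conjunto : List (List Int)) : Bool :=
  (List.range conjunto.length).foldl
    (fun v5 el =>
      if ¬ eh_posicao (conjunto.getD el []) then false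
      else
        (List.range (conjunto.length - 1)).foldl
          (fun v5' el' =>
            if conjunto.getD el' [] == conjunto.getD (el' + 1) [] then false else v5')
          v5)
    true

-- ===== PORT B =====
def okPos (u : List Int) : Bool := u.length == 2 && u.all (fun x => decide (0 ≤ x))

-- the zip loop of Source B: each step sees (prev, cur) and returns early on failure
def altGo (prev : List Int) : List (List Int) → Bool
  | [] => true
  | cur :: rest => if ¬ okPos cur || prev == cur then false else altGo cur rest

def eh_conj_posicoes_alt (conjunto : List (List Int)) : Bool :=
  match conjunto with
  | [] => true
  | u :: rest => if ¬ okPos u then false else altGo u rest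

-- ===== PRECONDITION & SPEC =====
def Spec_eh_conj_posicoes (conjunto : List (List Int)) (out : Bool) : Prop := out = eh_conj_posicoes_alt conjunto
instance (conjunto : List (List Int)) (out : Bool) : Decidable (Spec_eh_conj_posicoes conjunto out) := by unfold Spec_eh_conj_posicoes; infer_instance

-- ===== CLAIM (what is proved, stated in full; the proofs are below) =====
def Claim_equal_eh_conj_posicoes : Prop := ∀ (conjunto : List (List Int)), Dom_eh_conj_posicoes conjunto → Spec_eh_conj_posicoes conjunto (eh_conj_posicoes conjunto)

-- ===== LEMMAS AND PROOFS =====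

-- the adjacent-duplicate chain both programs decide
def adjChain (prev : List Int) : List (List Int) → Bool
  | [] => true
  | cur :: rest => !(prev == cur) && adjChain cur rest

-- eh_posicao's flag loop is an `all`
lemma eh_posicao_eq_okPos (u : List Int) : eh_posicao u = okPos u := by
  unfold eh_posicao okPos
  have h : ∀ (l : List Int) (b : Bool),
      l.foldl (fun v4 el => if el < 0 then false else v4) b
        = (b && l.all (fun x => decide (0 ≤ x))) := by
    intro l
    induction l with
    | nil => simp
    | cons x t ih =>
      intro b
      simp only [List.foldl_cons, List.all_cons, ih]
      by_cases hx : x < 0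
      · simp [hx, show ¬ (0 ≤ x) by omega]
      · simp [hx, show (0 ≤ x) by omega, Bool.and_left_comm]
  rw [h u true]
  by_cases hl : u.length = 2 <;> simp [hl]

-- A's inner loop: fold that turns the flag off on any adjacent duplicate
lemma inner_fold (l : List (List Int)) (idxs : List Nat) (v : Bool) :
    idxs.foldl (fun v' i => if l.getD i [] == l.getD (i + 1) [] then false else v') v
      = (v && idxs.all (fun i => !(l.getD i [] == l.getD (i + 1) []))) := by
  induction idxs generalizing v with
  | nil => simp
  | cons i t ih =>
    simp only [List.foldl_cons, List.all_cons]
    rw [ih]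
    cases hb : (l.getD i [] == l.getD (i + 1) []) <;>
      simp [hb, Bool.and_comm, Bool.and_left_comm, Bool.and_assoc]

-- A's outer loop, with the inner result abstracted as a fixed Bool D
lemma outer_fold (P : Nat → Bool) (D : Bool) (idxs : List Nat) (v : Bool) :
    idxs.foldl (fun v' i => if ¬ P i then false else (v' && D)) v
      = (v && idxs.all P && (idxs.isEmpty || D)) := by
  induction idxs generalizing v with
  | nil => simp
  | cons i t ih =>
    simp only [List.foldl_cons, List.all_cons, ih]
    by_cases h : P i
    · cases D <;> cases t <;> simp [h, Bool.and_comm, Bool.and_left_comm]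
    · simp [h]

-- the index-free reading of A's outer fold body
lemma eh_conj_posicoes_eq (l : List (List Int)) :
    eh_conj_posicoes l
      = ((List.range l.length).all (fun i => eh_posicao (l.getD i []))
          && ((List.range l.length).isEmpty
              || (List.range (l.length - 1)).all
                  (fun i => !(l.getD i [] == l.getD (i + 1) [])))) := by
  unfold eh_conj_posicoes
  have hbody :
      (fun (v5 : Bool) (el : Nat) =>
        if ¬ eh_posicao (l.getD el []) then false
        else
          (List.range (l.length - 1)).foldl
            (fun v5' el' => if l.getD el' [] == l.getD (el' + 1) [] then false else v5') v5)
      = (fun (v5 : Bool) (el : Nat) =>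
          if ¬ eh_posicao (l.getD el []) then false
          else (v5 && (List.range (l.length - 1)).all
                  (fun i => !(l.getD i [] == l.getD (i + 1) [])))) := by
    funext v5 el
    rw [inner_fold]
  rw [hbody, outer_fold]
  simp

-- index-based `all` over range = structural `all`
lemma range_all_pos (l : List (List Int)) :
    (List.range l.length).all (fun i => eh_posicao (l.getD i [])) = l.all okPos := by
  induction l with
  | nil => simp
  | cons u t ih =>
    rw [List.length_cons, List.range_succ_eq_map]
    simp only [List.all_cons, List.all_map]
    show ((eh_posicao u && (List.range t.length).all (fun i => eh_posicao (t.getD i [])))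
        = (okPos u && t.all okPos))
    rw [ih, eh_posicao_eq_okPos]

-- index-based adjacent-duplicate scan = the chain
lemma range_all_adj (u : List Int) (t : List (List Int)) :
    (List.range ((u :: t).length - 1)).all
        (fun i => !((u :: t).getD i [] == (u :: t).getD (i + 1) []))
      = adjChain u t := by
  induction t generalizing u with
  | nil => simp [adjChain]
  | cons c t' ih =>
    rw [show (u :: c :: t').length - 1 = t'.length + 1 from rfl, List.range_succ_eq_map]
    simp only [List.all_cons, List.all_map, Function.comp_def]
    have ih' : (List.range t'.length).all
        (fun i => !((c :: t').getD i [] == (c :: t').getD (i + 1) [])) = adjChain c t' := ih c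
    show ((!(u == c)) && (List.range t'.length).all
        (fun i => !((c :: t').getD i [] == (c :: t').getD (i + 1) []))) = adjChain u (c :: t')
    rw [ih']
    simp [adjChain]

-- B's loop = validity of the tail and the chain
lemma altGo_eq (p : List Int) (t : List (List Int)) :
    altGo p t = (t.all okPos && adjChain p t) := by
  induction t generalizing p with
  | nil => simp [altGo, adjChain]
  | cons c t' ih =>
    simp only [altGo, adjChain, List.all_cons, ih]
    by_cases h1 : okPos c <;> by_cases h2 : p == c <;> simp [h1, h2]

-- ===== VERDICT (by name: the statement is the Claim_ definition above) =====
theorem eh_conj_posicoes_spec : Claim_equal_eh_conj_posicoes := by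
  intro conjunto _
  show eh_conj_posicoes conjunto = eh_conj_posicoes_alt conjunto
  rw [eh_conj_posicoes_eq, range_all_pos]
  cases conjunto with
  | nil => simp [eh_conj_posicoes_alt]
  | cons u t =>
    rw [range_all_adj]
    simp only [eh_conj_posicoes_alt, altGo_eq]
    have hne : (List.range (t.length + 1)).isEmpty = false := by simp
    by_cases h1 : okPos u <;>
      simp [h1, hne, Bool.and_comm, Bool.and_left_comm, Bool.and_assoc]
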